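-- pv_equiv track=rewrite | github.com/jmizerka/sicss | rag/isap/helpers.py | match_text_type
-- ===== SOURCE A (Python) =====
-- from typing import Union, Dict, Any, Tuple
--
-- def match_text_type(doc: Dict[str, Any]) -> Tuple[str, str]:
--     """
--     This function checks which type of document we should download:
--     - 'U' means the official (consolidated) version
--     - 'O' means the original (announced) version
--     We prefer the 'U' version if it’s available
--     """
--     file_o = file_u = None # We start by assuming we don't have either version
--
--     # We go through the available text versions of this document
--     for text in doc.get('texts', []):
--         if text['type'] == 'U':
--             file_u = text['fileName'] # Save the file name of the official version
--             break  # # We found what we prefer, so we stop looking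
--         elif text['type'] == 'O':
--             # If we don’t have 'U', we take the original version instead
--             file_o = text['fileName']
--
--     # Return both values (one of them might still be None)
--     return file_u, file_o
-- ===== SOURCE B (Python) =====
-- def match_text_type(doc):
--     texts = doc.get('texts', [])
--     idx = next((i for i, t in enumerate(texts) if t['type'] == 'U'), None)
--     if idx is None:
--         file_u = None
--         prefix = texts
--     else:
--         file_u = texts[idx]['fileName']
--         prefix = texts[:idx]
--     o_names = [t['fileName'] for t in prefix if t['type'] == 'O']
--     file_o = o_names[-1] if o_names else None
--     return file_u, file_o
-- ===== Notes on version B (the rewrite author's own statement) =====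
-- stated objective: alternative
-- what changed: Replaces A's single break-loop with mutable state by an index-find of the first 'U' entry, a slice to that index, and a comprehension collecting 'O' file names whose last element is file_o.
import Mathlib
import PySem

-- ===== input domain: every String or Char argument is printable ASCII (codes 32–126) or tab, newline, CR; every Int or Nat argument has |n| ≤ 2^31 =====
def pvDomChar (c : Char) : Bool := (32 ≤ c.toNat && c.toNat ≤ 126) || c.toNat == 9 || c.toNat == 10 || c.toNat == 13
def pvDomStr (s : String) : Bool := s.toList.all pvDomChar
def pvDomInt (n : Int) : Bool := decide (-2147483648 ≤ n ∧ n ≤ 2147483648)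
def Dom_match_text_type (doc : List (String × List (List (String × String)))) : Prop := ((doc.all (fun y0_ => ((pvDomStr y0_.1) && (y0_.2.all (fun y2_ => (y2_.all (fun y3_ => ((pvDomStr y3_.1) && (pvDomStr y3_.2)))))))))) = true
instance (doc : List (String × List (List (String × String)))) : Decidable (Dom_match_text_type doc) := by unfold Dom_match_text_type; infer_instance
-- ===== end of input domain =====

-- B replaces A's break-loop by index-find of the first 'U' + a comprehension over the prefix slice (alternative decomposition, same cost).

-- ===== PORT A =====
-- text['type'] / text['fileName'] are dict lookups; on inputs admitted by Pre_ they always hit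
-- (Python would raise KeyError where get? is none; those inputs are excluded by Pre_, the .getD "" is only totalisation).
def pvLk (t : List (String × String)) (k : String) : Option String := (PySem.Dict.mk t).get? k

def matchGoA : List (List (String × String)) → Option String → Option String × Option String
  | [], file_o => (none, file_o)
  | t :: ts, file_o =>
    if (pvLk t "type").getD "" == "U" then (some ((pvLk t "fileName").getD ""), file_o)
    else if (pvLk t "type").getD "" == "O" then matchGoA ts (some ((pvLk t "fileName").getD ""))
    else matchGoA ts file_o

def match_text_type (doc : List (String × List (List (String × String)))) : Option String × Option String :=
  matchGoA ((PySem.Dict.mk doc).getD "texts" []) none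

-- ===== PORT B =====
def match_text_type_alt (doc : List (String × List (List (String × String)))) : Option String × Option String :=
  let texts := (PySem.Dict.mk doc).getD "texts" []
  let idx? := texts.findIdx? (fun t => (pvLk t "type").getD "" == "U")
  let file_u : Option String := idx?.map (fun i => ((pvLk (texts.getD i []) "fileName").getD ""))
  let prefx := match idx? with | none => texts | some i => texts.take i
  let o_names := (prefx.filter (fun t => (pvLk t "type").getD "" == "O")).map
                   (fun t => (pvLk t "fileName").getD "")
  (file_u, o_names.getLast?)

-- ===== PRECONDITION & SPEC =====
-- Pre_: exactly the inputs on which Python A returns (no KeyError): every text up to and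
-- including the first 'U'-typed one has a 'type' key, and a 'fileName' key when its type is 'U' or 'O'.
def Pre_match_text_type (doc : List (String × List (List (String × String)))) : Prop :=
  ∀ i, i < ((PySem.Dict.mk doc).getD "texts" []).length →
    (∀ j, j < i → pvLk (((PySem.Dict.mk doc).getD "texts" []).getD j []) "type" ≠ some "U") →
    ((pvLk (((PySem.Dict.mk doc).getD "texts" []).getD i []) "type").isSome ∧
     ((pvLk (((PySem.Dict.mk doc).getD "texts" []).getD i []) "type" = some "U" ∨
       pvLk (((PySem.Dict.mk doc).getD "texts" []).getD i []) "type" = some "O") →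
      (pvLk (((PySem.Dict.mk doc).getD "texts" []).getD i []) "fileName").isSome))
instance (doc : List (String × List (List (String × String)))) : Decidable (Pre_match_text_type doc) := by unfold Pre_match_text_type; infer_instance

def pvWitness_match_text_type : (List (String × List (List (String × String)))) :=
  [("texts", [[("type", "O"), ("fileName", "o.pdf")], [("type", "U"), ("fileName", "u.pdf")]])]

def Spec_match_text_type (doc : List (String × List (List (String × String)))) (out : Option String × Option String) : Prop := out = match_text_type_alt doc
instance (doc : List (String × List (List (String × String)))) (out : Option String × Option String) : Decidable (Spec_match_text_type doc out) := by unfold Spec_match_text_type; infer_instance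

-- ===== CLAIM (what is proved, stated in full; the proofs are below) =====
def Claim_equal_match_text_type : Prop := ∀ (doc : List (String × List (List (String × String)))), Dom_match_text_type doc → Pre_match_text_type doc → Spec_match_text_type doc (match_text_type doc)

-- ===== LEMMAS AND PROOFS =====

def altOnTexts (texts : List (List (String × String))) : Option String × Option String :=
  let idx? := texts.findIdx? (fun t => (pvLk t "type").getD "" == "U")
  let file_u : Option String := idx?.map (fun i => ((pvLk (texts.getD i []) "fileName").getD ""))
  let prefx := match idx? with | none => texts | some i => texts.take i
  let o_names := (prefx.filter (fun t => (pvLk t "type").getD "" == "O")).map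
                   (fun t => (pvLk t "fileName").getD "")
  (file_u, o_names.getLast?)

lemma getLast?_cons {α : Type} (x : α) (l : List α) :
    (x :: l).getLast? = (l.getLast?.or (some x)) := by
  cases l with
  | nil => rfl
  | cons y ys => simp [List.getLast?_cons_cons, Option.or]
                 cases h : (y :: ys).getLast? with
                 | none => simp [List.getLast?_eq_none_iff] at h
                 | some z => rfl

lemma matchGoA_eq (texts : List (List (String × String))) :
    ∀ fo : Option String,
      matchGoA texts fo =
        ((altOnTexts texts).1, ((altOnTexts texts).2).or fo) := by
  induction texts with
  | nil => intro fo; simp [matchGoA, altOnTexts, Option.or]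
  | cons t ts ih =>
    intro fo
    by_cases hU : ((pvLk t "type").getD "" == "U") = true
    · simp [matchGoA, altOnTexts, hU, List.findIdx?_cons, Option.or]
    · have hfind : (t :: ts).findIdx? (fun t => (pvLk t "type").getD "" == "U")
          = (ts.findIdx? (fun t => (pvLk t "type").getD "" == "U")).map (· + 1) := by
        simp [List.findIdx?_cons, hU]
      by_cases hO : ((pvLk t "type").getD "" == "O") = true
      · rw [show matchGoA (t :: ts) fo = matchGoA ts (some ((pvLk t "fileName").getD "")) from by
          simp [matchGoA, hU, hO]]
        rw [ih]
        unfold altOnTexts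
        rw [hfind]
        cases h : ts.findIdx? (fun t => (pvLk t "type").getD "" == "U") with
        | none =>
          simp only [Option.map_none]
          simp [hO, getLast?_cons]
        | some i =>
          simp only [Option.map_some]
          simp [hO, getLast?_cons]
      · rw [show matchGoA (t :: ts) fo = matchGoA ts fo from by simp [matchGoA, hU, hO]]
        rw [ih]
        unfold altOnTexts
        rw [hfind]
        cases h : ts.findIdx? (fun t => (pvLk t "type").getD "" == "U") with
        | none =>
          simp only [Option.map_none]
          simp [hO]
        | some i =>
          simp only [Option.map_some]
          simp [hO]

lemma alt_eq_altOnTexts (doc : List (String × List (List (String × String)))) :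
    match_text_type_alt doc = altOnTexts ((PySem.Dict.mk doc).getD "texts" []) := rfl

-- ===== VERDICT (by name: the statement is the Claim_ definition above) =====
theorem match_text_type_spec : Claim_equal_match_text_type := by
  intro doc _ _
  unfold Spec_match_text_type
  rw [alt_eq_altOnTexts]
  unfold match_text_type
  rw [matchGoA_eq]
  simp
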